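-- pv_equiv track=rewrite | github.com/wise-bit/advent-of-code | 2024/day21.py | init_filter_moves
-- ===== SOURCE A (Python) =====
-- def init_filter_moves(moves):
--   max_repeats = 0
--   collect = []
--
--   for m in moves:
--     for i in range(len(m)):
--       curr_repeats = 1
--
--       for j in range(i + 1, len(m)):
--         if m[i] != m[j]:
--           break
--         curr_repeats += 1
--
--       if max_repeats == curr_repeats:
--         collect.append(m)
--
--       elif max_repeats < curr_repeats:
--         max_repeats = curr_repeats
--         collect = [m]
--
--   return collect
-- ===== SOURCE B (Python) =====
-- def init_filter_moves(moves):
--   # One reverse pass per string computes the run length at each position,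
--   # then the same compare/append scan runs in O(len(m)) instead of O(len(m)^2).
--   max_repeats = 0
--   collect = []
--
--   for m in moves:
--     runs = []
--     prev = None
--     r = 0
--     for ch in reversed(m):
--       r = r + 1 if ch == prev else 1
--       prev = ch
--       runs.append(r)
--     runs.reverse()
--
--     for curr in runs:
--       if max_repeats == curr:
--         collect.append(m)
--       elif max_repeats < curr:
--         max_repeats = curr
--         collect = [m]
--
--   return collect
-- ===== Notes on version B (the rewrite author's own statement) =====
-- stated objective: faster
-- what changed: B replaces A's quadratic inner rescan (for each position, re-count the run by scanning forward) with a single reverse pass per string that precomputes the run length at every position, then replays the same compare/append loop over those lengths.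
import Mathlib
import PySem

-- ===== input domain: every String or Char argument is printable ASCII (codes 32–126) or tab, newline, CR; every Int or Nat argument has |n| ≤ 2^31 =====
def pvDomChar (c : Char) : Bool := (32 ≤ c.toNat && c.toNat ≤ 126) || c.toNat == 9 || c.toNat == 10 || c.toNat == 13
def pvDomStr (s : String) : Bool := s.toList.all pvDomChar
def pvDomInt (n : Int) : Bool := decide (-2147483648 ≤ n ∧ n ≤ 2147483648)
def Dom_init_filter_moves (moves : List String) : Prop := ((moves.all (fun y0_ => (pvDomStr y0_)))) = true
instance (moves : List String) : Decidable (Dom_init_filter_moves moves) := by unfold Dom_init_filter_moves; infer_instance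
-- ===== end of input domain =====

-- B precomputes per-position run lengths in one reverse pass per string (O(N*L))
-- instead of A's forward rescan at every position (O(N*L^2)); timing run measures the speed-up.

-- ===== PORT A =====
-- inner loop 'for j in range(i+1, len(m)): if m[i] != m[j]: break; curr += 1';
-- m[i] is the loop-invariant char ci (i, j are always in range, so getD is exact).
def scanA (m : List Char) (ci : Char) (j : Nat) : Nat :=
  if _h : j < m.length then
    if ci ≠ m.getD j ' ' then 0
    else 1 + scanA m ci (j + 1)
  else 0
termination_by m.length - j
decreasing_by omega

def init_filter_moves (moves : List String) : List String :=
  (moves.foldl (fun (st : Nat × List String) m =>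
    (List.range m.toList.length).foldl (fun st i =>
      let curr := 1 + scanA m.toList (m.toList.getD i ' ') (i + 1)
      if st.1 = curr then (st.1, st.2 ++ [m])
      else if st.1 < curr then (curr, [m])
      else st) st) (0, [])).2

-- ===== PORT B =====
-- reverse pass: state = (prev char, current run length r, runs accumulated in reverse order)
def runsRevStep (st : Option Char × Nat × List Nat) (ch : Char) : Option Char × Nat × List Nat :=
  let r := if st.1 = some ch then st.2.1 + 1 else 1
  (some ch, r, st.2.2 ++ [r])

def runsRev (m : List Char) : List Nat :=
  ((m.reverse.foldl runsRevStep (none, 0, [])).2.2).reverse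

def init_filter_moves_alt (moves : List String) : List String :=
  (moves.foldl (fun (st : Nat × List String) m =>
    (runsRev m.toList).foldl (fun st curr =>
      if st.1 = curr then (st.1, st.2 ++ [m])
      else if st.1 < curr then (curr, [m])
      else st) st) (0, [])).2

-- ===== PRECONDITION & SPEC =====
def Spec_init_filter_moves (moves : List String) (out : List String) : Prop := out = init_filter_moves_alt moves
instance (moves : List String) (out : List String) : Decidable (Spec_init_filter_moves moves out) := by unfold Spec_init_filter_moves; infer_instance

-- ===== CLAIM (what is proved, stated in full; the proofs are below) =====
def Claim_equal_init_filter_moves : Prop := ∀ (moves : List String), Dom_init_filter_moves moves → Spec_init_filter_moves moves (init_filter_moves moves)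

-- ===== LEMMAS AND PROOFS =====

-- run lengths, specified by forward recursion
def runsSpec : List Char → List Nat
  | [] => []
  | c :: l => (if l.head? = some c then (runsSpec l).headD 0 + 1 else 1) :: runsSpec l

lemma runsRev_foldl (l : List Char) :
    l.reverse.foldl runsRevStep (none, 0, []) =
      (l.head?, (runsSpec l).headD 0, (runsSpec l).reverse) := by
  induction l with
  | nil => rfl
  | cons c l ih =>
    rw [List.reverse_cons, List.foldl_append, ih, List.foldl_cons, List.foldl_nil]
    simp only [runsRevStep, runsSpec, List.headD_cons, List.head?_cons, List.reverse_cons]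

lemma runsRev_eq (l : List Char) : runsRev l = runsSpec l := by
  unfold runsRev
  rw [runsRev_foldl, List.reverse_reverse]

lemma scanA_cons (c : Char) (l : List Char) (ci : Char) (j : Nat) :
    scanA (c :: l) ci (j + 1) = scanA l ci j := by
  have H : ∀ n j, l.length - j ≤ n → scanA (c :: l) ci (j + 1) = scanA l ci j := by
    intro n
    induction n with
    | zero =>
      intro j hj
      conv_lhs => rw [scanA]
      conv_rhs => rw [scanA]
      rw [dif_neg (show ¬ j + 1 < (c :: l).length by simp only [List.length_cons]; omega),
        dif_neg (by omega)]
    | succ n ih =>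
      intro j hj
      by_cases h : j < l.length
      · conv_lhs => rw [scanA]
        conv_rhs => rw [scanA]
        rw [dif_pos (show j + 1 < (c :: l).length by simp only [List.length_cons]; omega),
          dif_pos h]
        simp only [List.getD_cons_succ]
        by_cases h2 : ci = l.getD j ' '
        · rw [if_neg (by simp [h2]), if_neg (by simp [h2]), ih (j + 1) (by omega)]
        · rw [if_pos h2, if_pos h2]
      · conv_lhs => rw [scanA]
        conv_rhs => rw [scanA]
        rw [dif_neg (show ¬ j + 1 < (c :: l).length by simp only [List.length_cons]; omega),
          dif_neg h]
  exact H (l.length - j) j le_rfl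

lemma scanA_head (l : List Char) (c : Char) :
    1 + scanA (c :: l) c 1 = if l.head? = some c then (runsSpec l).headD 0 + 1 else 1 := by
  induction l generalizing c with
  | nil => rw [scanA]; simp
  | cons d l' ih =>
    rw [scanA]
    simp only [List.length_cons, List.getD_cons_succ, List.getD_cons_zero, List.head?_cons]
    rw [dif_pos (by omega)]
    by_cases hcd : c = d
    · subst hcd
      rw [if_neg (by simp), if_pos rfl, scanA_cons]
      have h := ih c
      rw [runsSpec, List.headD_cons, ← h]
      omega
    · rw [if_pos hcd, if_neg (by simp only [Option.some.injEq]; exact fun h => hcd h.symm)]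

lemma map_range_eq_runsSpec (l : List Char) :
    (List.range l.length).map (fun i => 1 + scanA l (l.getD i ' ') (i + 1)) = runsSpec l := by
  induction l with
  | nil => rfl
  | cons c l ih =>
    rw [List.length_cons, List.range_succ_eq_map, List.map_cons, List.map_map]
    have tail : (List.range l.length).map
        ((fun i => 1 + scanA (c :: l) ((c :: l).getD i ' ') (i + 1)) ∘ Nat.succ)
        = runsSpec l := by
      rw [← ih]
      apply List.map_congr_left
      intro i _
      simp only [Function.comp_apply, List.getD_cons_succ, scanA_cons]
    rw [tail, runsSpec]
    congr 1
    simpa only [List.getD_cons_zero, Nat.zero_add] using scanA_head l c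

lemma inner_fold_eq (m : String) (st : Nat × List String) :
    (List.range m.toList.length).foldl (fun st i =>
      let curr := 1 + scanA m.toList (m.toList.getD i ' ') (i + 1)
      if st.1 = curr then (st.1, st.2 ++ [m])
      else if st.1 < curr then (curr, [m])
      else st) st
    = (runsRev m.toList).foldl (fun st curr =>
      if st.1 = curr then (st.1, st.2 ++ [m])
      else if st.1 < curr then (curr, [m])
      else st) st := by
  rw [runsRev_eq, ← map_range_eq_runsSpec, List.foldl_map]

-- ===== VERDICT (by name: the statement is the Claim_ definition above) =====
theorem init_filter_moves_spec : Claim_equal_init_filter_moves := by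
  intro moves _
  show init_filter_moves moves = init_filter_moves_alt moves
  unfold init_filter_moves init_filter_moves_alt
  congr 1
  congr 1
  funext st m
  exact inner_fold_eq m st
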